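-- pv_equiv track=rewrite | github.com/yesonsys03-web/VibeLign | vibelign/core/protected_files.py | is_protected
-- ===== SOURCE A (Python) =====
-- def normalize_relpath(rel_path: str) -> str:
--     return rel_path.replace("\\", "/")
--
-- def is_protected(rel_path: str, protected: set[str]) -> bool:
--     """주어진 상대 경로가 보호 목록에 있는지 확인한다 (파일 또는 폴더 접두사 포함)."""
--     if not protected:
--         return False
--     rel_path = normalize_relpath(rel_path)
--     for pf in protected:
--         pf_norm = normalize_relpath(pf)
--         if rel_path == pf_norm:
--             return True
--         # 폴더 보호: 해당 폴더 하위 경로 전부 해당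
--         if rel_path.startswith(pf_norm.rstrip("/") + "/"):
--             return True
--     return False
-- ===== SOURCE B (Python) =====
-- def normalize_relpath(rel_path: str) -> str:
--     return rel_path.replace("\\", "/")
--
-- def is_protected(rel_path: str, protected: set[str]) -> bool:
--     if not protected:
--         return False
--     exact = {normalize_relpath(pf) for pf in protected}
--     folders = {normalize_relpath(pf).rstrip("/") for pf in protected}
--     rel_path = normalize_relpath(rel_path)
--     if rel_path in exact:
--         return True
--     return any(rel_path[:j] in folders
--                for j, ch in enumerate(rel_path) if ch == "/")
-- ===== Notes on version B (the rewrite author's own statement) =====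
-- stated objective: alternative
-- what changed: B precomputes two sets (normalized exact paths and their rstrip('/')-ed folder prefixes) and then tests rel_path for exact membership and each '/'-boundary prefix of rel_path for folder membership, instead of A's per-entry scan with startswith.
import Mathlib
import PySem

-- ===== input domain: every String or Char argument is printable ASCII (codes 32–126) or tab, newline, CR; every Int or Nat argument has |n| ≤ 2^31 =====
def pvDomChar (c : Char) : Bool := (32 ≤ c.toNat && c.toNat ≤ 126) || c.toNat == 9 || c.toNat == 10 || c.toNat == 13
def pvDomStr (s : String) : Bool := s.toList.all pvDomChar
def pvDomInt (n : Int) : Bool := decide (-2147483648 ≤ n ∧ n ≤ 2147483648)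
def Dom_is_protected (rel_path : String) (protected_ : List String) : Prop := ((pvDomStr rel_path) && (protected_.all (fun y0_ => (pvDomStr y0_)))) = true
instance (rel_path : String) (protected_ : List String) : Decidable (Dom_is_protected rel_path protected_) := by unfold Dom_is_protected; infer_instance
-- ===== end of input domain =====

-- B replaces A's per-entry linear scan with startswith by two precomputed sets
-- (exact paths and rstripped folder prefixes) probed at each '/' boundary of rel_path
-- (objective: alternative decomposition; return values proved equal on all inputs).


-- ===== PORT A =====
-- normalize_relpath: rel_path.replace("\\", "/")
def pvNormalize (cs : List Char) : List Char := PySem.Chars.replace cs ['\\'] ['/']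
-- hand port of str.rstrip("/") (PySem has no one-sided strip with a chars argument):
-- drop every trailing '/', exact for this single-character chars set
def pvRstripSlash (cs : List Char) : List Char := (cs.reverse.dropWhile (fun c => c == '/')).reverse

def is_protected (rel_path : String) (protected_ : List String) : Bool :=
  if protected_.isEmpty then false
  else
    let rel := pvNormalize rel_path.toList
    -- for pf in protected: return True on first match (== or folder-prefix), else False
    protected_.any (fun pf =>
      let pf_norm := pvNormalize pf.toList
      rel == pf_norm || PySem.Chars.startswith rel (pvRstripSlash pf_norm ++ ['/']))

-- ===== PORT B =====
def is_protected_alt (rel_path : String) (protected_ : List String) : Bool :=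
  if protected_.isEmpty then false
  else
    let exact : PySem.Set (List Char) :=
      protected_.foldl (fun s pf => PySem.Set.add s (pvNormalize pf.toList)) PySem.Set.empty
    let folders : PySem.Set (List Char) :=
      protected_.foldl (fun s pf => PySem.Set.add s (pvRstripSlash (pvNormalize pf.toList))) PySem.Set.empty
    let rel := pvNormalize rel_path.toList
    if PySem.Set.contains exact rel then true
    else
      (PySem.List.enumerate rel 0).any (fun jc =>
        jc.2 == '/' && PySem.Set.contains folders (PySem.Chars.slice rel none (some jc.1)))

-- ===== PRECONDITION & SPEC =====
def Spec_is_protected (rel_path : String) (protected_ : List String) (out : Bool) : Prop := out = is_protected_alt rel_path protected_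
instance (rel_path : String) (protected_ : List String) (out : Bool) : Decidable (Spec_is_protected rel_path protected_ out) := by unfold Spec_is_protected; infer_instance

-- ===== CLAIM (what is proved, stated in full; the proofs are below) =====
def Claim_equal_is_protected : Prop := ∀ (rel_path : String) (protected_ : List String), Dom_is_protected rel_path protected_ → Spec_is_protected rel_path protected_ (is_protected rel_path protected_)

-- ===== LEMMAS AND PROOFS =====

-- startswith rel (p ++ "/") holds iff p is the prefix of rel cut at some '/' of rel
theorem pv_slash_prefix (rel p : List Char) :
    PySem.Chars.startswith rel (p ++ ['/']) = true ↔
      ∃ j, ∃ _h : j < rel.length, rel[j] = '/' ∧ rel.take j = p := by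
  rw [PySem.Chars.startswith_iff]
  constructor
  · rintro ⟨t, rfl⟩
    refine ⟨p.length, by simp, ?_, ?_⟩
    · simp
    · simp
  · rintro ⟨j, h, hch, rfl⟩
    refine ⟨rel.drop (j + 1), ?_⟩
    have hd : rel.drop j = rel[j] :: rel.drop (j + 1) := List.drop_eq_getElem_cons h
    calc (rel.take j ++ ['/']) ++ rel.drop (j + 1)
        = rel.take j ++ ('/' :: rel.drop (j + 1)) := by simp
      _ = rel.take j ++ rel.drop j := by rw [hd, hch]
      _ = rel := List.take_append_drop j rel

theorem pv_enum_any (rel : List Char) (folders : PySem.Set (List Char)) :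
    ((PySem.List.enumerate rel 0).any (fun jc =>
        jc.2 == '/' && PySem.Set.contains folders (PySem.Chars.slice rel none (some jc.1))) = true) ↔
      ∃ j, ∃ _h : j < rel.length, rel[j] = '/' ∧ rel.take j ∈ folders := by
  rw [List.any_eq_true]
  constructor
  · rintro ⟨jc, hmem, hp⟩
    rw [PySem.List.mem_enumerate_iff] at hmem
    obtain ⟨k, hk, rfl⟩ := hmem
    simp only [zero_add, Bool.and_eq_true, beq_iff_eq] at hp
    refine ⟨k, hk, hp.1, ?_⟩
    have : PySem.Chars.slice rel none (some (k : Int)) = rel.take k := by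
      simp [PySem.Chars.slice_eq_listSlice, PySem.List.slice_to_natCast]
    rw [this] at hp
    exact (PySem.Set.contains_iff _ _).mp hp.2
  · rintro ⟨j, h, hch, hmem⟩
    refine ⟨((j : Int), rel[j]), ?_, ?_⟩
    · rw [PySem.List.mem_enumerate_iff]
      exact ⟨j, h, by simp⟩
    · simp only [Bool.and_eq_true, beq_iff_eq]
      refine ⟨hch, ?_⟩
      have : PySem.Chars.slice rel none (some (j : Int)) = rel.take j := by
        simp [PySem.Chars.slice_eq_listSlice, PySem.List.slice_to_natCast]
      rw [this]
      exact (PySem.Set.contains_iff _ _).mpr hmem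

theorem pv_mem_built (l : List String) (f : String → List Char) (x : List Char) :
    x ∈ l.foldl (fun s pf => PySem.Set.add s (f pf)) PySem.Set.empty ↔ ∃ pf ∈ l, x = f pf := by
  rw [PySem.Set.mem_foldl_add]
  simp [PySem.Set.empty]

-- ===== VERDICT (by name: the statement is the Claim_ definition above) =====
theorem is_protected_spec : Claim_equal_is_protected := by
  intro rel_path protected_ _
  unfold Spec_is_protected is_protected is_protected_alt
  by_cases hE : protected_.isEmpty
  · simp [hE]
  · simp only [hE, if_neg, Bool.false_eq_true, not_false_iff]
    set rel := pvNormalize rel_path.toList with hrel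
    rw [Bool.eq_iff_iff]
    constructor
    · intro h
      rw [List.any_eq_true] at h
      obtain ⟨pf, hpf, hcond⟩ := h
      simp only [Bool.or_eq_true, beq_iff_eq] at hcond
      rcases hcond with heq | hstart
      · rw [if_pos]
        exact (PySem.Set.contains_iff _ _).mpr ((pv_mem_built _ _ _).mpr ⟨pf, hpf, heq⟩)
      · rw [pv_slash_prefix] at hstart
        obtain ⟨j, hj, hch, htake⟩ := hstart
        split
        · rfl
        · rw [pv_enum_any]
          exact ⟨j, hj, hch, (pv_mem_built _ _ _).mpr ⟨pf, hpf, htake⟩⟩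
    · intro h
      rw [List.any_eq_true]
      split at h
      · rename_i hc
        have := (pv_mem_built _ _ _).mp ((PySem.Set.contains_iff _ _).mp hc)
        obtain ⟨pf, hpf, heq⟩ := this
        exact ⟨pf, hpf, by simp [heq]⟩
      · rw [pv_enum_any] at h
        obtain ⟨j, hj, hch, hmem⟩ := h
        obtain ⟨pf, hpf, heq⟩ := (pv_mem_built _ _ _).mp hmem
        refine ⟨pf, hpf, ?_⟩
        simp only [Bool.or_eq_true, beq_iff_eq]
        right
        rw [pv_slash_prefix]
        exact ⟨j, hj, hch, heq⟩
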